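-- pv_equiv track=rewrite | github.com/Lihong062/CS101 | APTs/APT-6/SortedFreqs.py | freqs
-- ===== SOURCE A (Python) =====
-- def freqs(data):
--     """
--     return list of int values corresponding
--     to frequencies of strings in data, a list
--     of strings
--     """
--     data = sorted(data)
--
--     counted = []
--     order = []
--     for entry in data:
--         if entry not in counted:
--             counted.append(entry)
--             order.append(1)
--         else:
--             order[-1] += 1
--
--     return order
-- ===== SOURCE B (Python) =====
-- def freqs(data):
--     """
--     return list of int values corresponding
--     to frequencies of strings in data, a list
--     of strings
--     """
--     counts = {}
--     for s in data:
--         counts[s] = counts.get(s, 0) + 1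
--     return [counts[k] for k in sorted(counts)]
-- ===== Notes on version B (the rewrite author's own statement) =====
-- stated objective: faster
-- what changed: Replaced sort-then-group (with a quadratic 'entry not in counted' membership scan and last-slot increment) by a one-pass dict counter followed by emitting counts for the keys in sorted order.
import Mathlib
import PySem

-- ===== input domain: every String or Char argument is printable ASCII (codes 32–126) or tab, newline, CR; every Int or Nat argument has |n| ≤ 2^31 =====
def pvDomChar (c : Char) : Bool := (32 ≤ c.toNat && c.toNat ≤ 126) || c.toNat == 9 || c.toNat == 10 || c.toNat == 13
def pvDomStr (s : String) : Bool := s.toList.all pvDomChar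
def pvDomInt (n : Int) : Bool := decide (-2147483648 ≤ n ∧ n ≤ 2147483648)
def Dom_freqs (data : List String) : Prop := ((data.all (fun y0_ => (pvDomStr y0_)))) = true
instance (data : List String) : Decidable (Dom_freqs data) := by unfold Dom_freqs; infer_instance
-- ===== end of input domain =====

-- B replaces A's sort-then-group-runs (membership scan into 'counted', last-slot increment) by a
-- one-pass dict counter whose counts are emitted in sorted-key order (faster: no linear membership scan per element).


-- ===== PORT A =====
-- one iteration of A's loop body: state = (counted, order)
def freqsStep (st : List String × List Int) (entry : String) : List String × List Int :=
  if entry ∉ st.1 then (st.1 ++ [entry], st.2 ++ [1])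
  else (st.1, PySem.List.pySetD st.2 (-1) (PySem.List.pyGetD st.2 (-1) 0 + 1))

def freqs (data : List String) : List Int :=
  let data' := PySem.List.sorted data (fun x => x) false
  (data'.foldl freqsStep ([], [])).2

-- ===== PORT B =====
def freqs_alt (data : List String) : List Int :=
  let counts := data.foldl (fun d s => d.insert s (d.getD s 0 + 1)) PySem.Dict.empty
  (PySem.List.sorted counts.keys (fun x => x) false).map (fun k => counts.getD k 0)

-- ===== PRECONDITION & SPEC =====
def Spec_freqs (data : List String) (out : List Int) : Prop := out = freqs_alt data
instance (data : List String) (out : List Int) : Decidable (Spec_freqs data out) := by unfold Spec_freqs; infer_instance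

-- ===== CLAIM (what is proved, stated in full; the proofs are below) =====
def Claim_equal_freqs : Prop := ∀ (data : List String), Dom_freqs data → Spec_freqs data (freqs data)

-- ===== LEMMAS AND PROOFS =====

-- order[-1] += 1 on a non-empty list written as xs ++ [x]
lemma set_last_append (xs : List Int) (x v : Int) :
    PySem.List.pySetD (xs ++ [x]) (-1) v = xs ++ [v] := by
  have h : (xs ++ [x]).set xs.length v = xs ++ [v] := by
    induction xs with
    | nil => simp
    | cons a t ih => simp [ih]
  have h2 : PySem.List.pyIdx? (xs.length + 1) (-1) = some xs.length := by
    simp [PySem.List.pyIdx?]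
  simp [PySem.List.pySetD, PySem.List.pySet?, h2, h]

lemma dedup_append_singleton (xs : List String) (e : String) :
    PySem.List.dedup (xs ++ [e]) =
      if e ∈ xs then PySem.List.dedup xs else PySem.List.dedup xs ++ [e] := by
  simp only [PySem.List.dedup_eq_ofList]
  have h1 : PySem.Set.ofList (xs ++ [e]) = (PySem.Set.ofList xs).add e := by
    simp [PySem.Set.ofList]
  rw [h1]
  by_cases hm : e ∈ xs
  · simp [PySem.Set.add, PySem.Set.mem_ofList, hm]
  · simp [PySem.Set.add, PySem.Set.mem_ofList, hm]

lemma dedup_sublist (xs : List String) : (PySem.List.dedup xs).Sublist xs := by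
  induction xs using List.reverseRecOn with
  | nil => simp [PySem.List.dedup, PySem.Set.ofList]
  | append_singleton ys e ih =>
    rw [dedup_append_singleton]
    by_cases hm : e ∈ ys
    · simp only [hm, if_pos]
      exact ih.trans (List.sublist_append_left ys [e])
    · simp only [hm, if_neg, not_false_iff]
      exact ih.append (List.Sublist.refl [e])

-- in a sorted duplicate-free list an upper bound that is a member is the last element
lemma eq_append_last (l : List String) : ∀ (e : String),
    l.Pairwise (· ≤ ·) → l.Nodup → e ∈ l → (∀ x ∈ l, x ≤ e) → ∃ l₀, l = l₀ ++ [e] := by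
  induction l with
  | nil => intro e _ _ hm _; cases hm
  | cons a t ih =>
    intro e hp hn hm hub
    rcases List.mem_cons.mp hm with rfl | hmt
    · cases t with
      | nil => exact ⟨[], rfl⟩
      | cons b t' =>
        exfalso
        have heb : e ≤ b := (List.pairwise_cons.mp hp).1 b (by simp)
        have hbe : b ≤ e := hub b (by simp)
        have hb : b = e := le_antisymm hbe heb
        subst hb
        exact (List.nodup_cons.mp hn).1 (by simp)
    · obtain ⟨t₀, ht⟩ := ih e (List.pairwise_cons.mp hp).2 (List.nodup_cons.mp hn).2 hmt
        (fun x hx => hub x (List.mem_cons_of_mem a hx))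
      exact ⟨a :: t₀, by rw [ht]; rfl⟩

-- invariant of A's loop over the sorted list
lemma loop_inv (r : List String) : ∀ (p : List String), (p ++ r).Pairwise (· ≤ ·) →
    r.foldl freqsStep
      (PySem.List.dedup p, (PySem.List.dedup p).map (fun k => (List.count k p : Int)))
    = (PySem.List.dedup (p ++ r),
       (PySem.List.dedup (p ++ r)).map (fun k => (List.count k (p ++ r) : Int))) := by
  induction r with
  | nil => intro p _; simp
  | cons e r' ih =>
    intro p hpw
    have hpw' : ((p ++ [e]) ++ r').Pairwise (· ≤ ·) := by
      simpa [List.append_assoc] using hpw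
    have hup : ∀ x ∈ p, x ≤ e := by
      intro x hx
      exact (List.pairwise_append.mp hpw).2.2 x hx e (by simp)
    have key : freqsStep
        (PySem.List.dedup p, (PySem.List.dedup p).map (fun k => (List.count k p : Int))) e
        = (PySem.List.dedup (p ++ [e]),
           (PySem.List.dedup (p ++ [e])).map (fun k => (List.count k (p ++ [e]) : Int))) := by
      by_cases hm : e ∈ p
      · -- duplicate key: A increments the last slot
        have hp1 : p.Pairwise (· ≤ ·) := (List.pairwise_append.mp hpw).1
        have hdp : (PySem.List.dedup p).Pairwise (· ≤ ·) := hp1.sublist (dedup_sublist p)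
        obtain ⟨l₀, hl₀⟩ := eq_append_last (PySem.List.dedup p) e hdp
          (PySem.List.nodup_dedup p) ((PySem.List.mem_dedup p e).mpr hm)
          (fun x hx => hup x ((PySem.List.mem_dedup p x).mp hx))
        have hnd := PySem.List.nodup_dedup p
        rw [hl₀] at hnd
        have hnotl₀ : e ∉ l₀ := fun hh => (List.nodup_append.mp hnd).2.2 e hh e (by simp) rfl
        have hmd : e ∈ PySem.List.dedup p := (PySem.List.mem_dedup p e).mpr hm
        unfold freqsStep
        dsimp only
        rw [if_neg (not_not_intro hmd)]
        rw [dedup_append_singleton, if_pos hm, hl₀]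
        have h1 : l₀.map (fun k => (List.count k p : Int))
            = l₀.map (fun k => (List.count k (p ++ [e]) : Int)) := by
          apply List.map_congr_left
          intro k hk
          have hke : k ≠ e := fun h => hnotl₀ (h ▸ hk)
          simp [List.count_append, List.count_nil, Ne.symm hke]
        simp only [List.map_append, List.map_cons, List.map_nil,
          PySem.List.pyGetD_neg_one_append_singleton, set_last_append, h1]
        simp [List.count_append, List.count_cons, List.count_nil]
      · -- new key: A appends a fresh 1
        have hmd : e ∉ PySem.List.dedup p := fun h => hm ((PySem.List.mem_dedup p e).mp h)
        unfold freqsStep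
        dsimp only
        rw [if_pos hmd]
        rw [dedup_append_singleton, if_neg hm]
        have h1 : (PySem.List.dedup p).map (fun k => (List.count k p : Int))
            = (PySem.List.dedup p).map (fun k => (List.count k (p ++ [e]) : Int)) := by
          apply List.map_congr_left
          intro k hk
          have hke : k ≠ e := fun h => hmd (h ▸ hk)
          simp [List.count_append, List.count_nil, Ne.symm hke]
        simp only [List.map_append, List.map_cons, List.map_nil, h1]
        simp [List.count_append, List.count_cons, List.count_nil, List.count_eq_zero.mpr hm]
    calc (e :: r').foldl freqsStep
          (PySem.List.dedup p, (PySem.List.dedup p).map (fun k => (List.count k p : Int)))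
        = r'.foldl freqsStep (freqsStep
            (PySem.List.dedup p, (PySem.List.dedup p).map (fun k => (List.count k p : Int))) e) := rfl
      _ = _ := by
          rw [key, ih (p ++ [e]) hpw']
          simp [List.append_assoc]

-- A computes the counts of the first-occurrence dedup of the sorted list
lemma freqs_eq (data : List String) :
    freqs data = (PySem.List.dedup (PySem.List.sorted data (fun x => x) false)).map
      (fun k => (List.count k (PySem.List.sorted data (fun x => x) false) : Int)) := by
  have h := loop_inv (PySem.List.sorted data (fun x => x) false) []
    (by simpa using PySem.List.sorted_pairwise data (fun x => x))
  simp only [List.nil_append] at h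
  simp only [freqs]
  exact congrArg Prod.snd h

-- B computes the counts of the keys in sorted order
lemma freqs_alt_eq (data : List String) :
    freqs_alt data = (PySem.List.sorted (PySem.Set.ofList data) (fun x => x) false).map
      (fun k => (List.count k data : Int)) := by
  simp only [freqs_alt, PySem.Dict.foldl_insert_getD_add_one_eq_counter, PySem.Dict.keys_counter]
  apply List.map_congr_left
  intro k _
  exact PySem.Dict.getD_counter data k

lemma dedup_sorted_eq (data : List String) :
    PySem.List.sorted (PySem.Set.ofList data) (fun x => x) false
      = PySem.List.dedup (PySem.List.sorted data (fun x => x) false) := by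
  apply PySem.List.sorted_eq_of_perm_of_pairwise_lt
  · rw [List.perm_ext_iff_of_nodup (PySem.List.nodup_dedup _) (PySem.Set.nodup_ofList data)]
    intro a
    rw [PySem.List.mem_dedup, PySem.Set.mem_ofList,
      (PySem.List.sorted_perm data (fun x => x) false).mem_iff]
  · have hle : (PySem.List.dedup (PySem.List.sorted data (fun x => x) false)).Pairwise (· ≤ ·) :=
      (PySem.List.sorted_pairwise data (fun x => x)).sublist (dedup_sublist _)
    have hnd := PySem.List.nodup_dedup (PySem.List.sorted data (fun x => x) false)
    exact (hle.and hnd).imp (fun h => lt_of_le_of_ne h.1 h.2)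

-- ===== VERDICT (by name: the statement is the Claim_ definition above) =====
theorem freqs_spec : Claim_equal_freqs := by
  intro data _
  show freqs data = freqs_alt data
  rw [freqs_eq, freqs_alt_eq, dedup_sorted_eq]
  apply List.map_congr_left
  intro k _
  rw [(PySem.List.sorted_perm data (fun x => x) false).count_eq]
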